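-- pv_equiv track=rewrite | github.com/CoderDayton/semantic-cache-mcp | src/semantic_cache_mcp/cache/_helpers.py | _find_match_line_numbers
-- ===== SOURCE A (Python) =====
-- import bisect
--
-- def _find_match_line_numbers(content: str, search_string: str) -> list[int]:
--     """Find line numbers where search_string appears.
--
--     Returns 1-based line numbers for each occurrence.
--     Uses binary search for O(M log N) complexity where M=matches, N=lines.
--     """
--     lines = content.splitlines(keepends=True)
--     line_numbers: list[int] = []
--
--     if not lines:
--         return line_numbers
--
--     # Build cumulative character positions for binary search
--     char_pos = 0
--     line_starts: list[int] = []
--     for line in lines: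
--         line_starts.append(char_pos)
--         char_pos += len(line)
--
--     # Find all occurrences with O(log N) line lookup
--     start = 0
--     while True:
--         idx = content.find(search_string, start)
--         if idx == -1:
--             break
--
--         # Binary search for line number - O(log N) per match
--         # bisect_right returns insertion point; -1 gives us the line containing idx
--         line_num = bisect.bisect_right(line_starts, idx)
--         line_numbers.append(line_num)  # Already 1-based due to bisect_right behavior
--         start = idx + 1
--
--     return line_numbers
-- ===== SOURCE B (Python) =====
-- def _find_match_line_numbers(content: str, search_string: str) -> list[int]:
--     """Find 1-based line numbers of each occurrence of search_string.
--
--     Streams through the lines with a running boundary instead of building a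
--     cumulative-start array and binary-searching it: match indices from
--     successive find() calls only grow, so one forward line pointer suffices.
--     """
--     lines = content.splitlines(keepends=True)
--     if not lines:
--         return []
--     line_numbers: list[int] = []
--     j = 1                       # current 1-based line number
--     boundary = len(lines[0])    # index where line j+1 starts
--     start = 0
--     while True:
--         idx = content.find(search_string, start)
--         if idx == -1:
--             return line_numbers
--         while j < len(lines) and boundary <= idx:
--             boundary += len(lines[j])
--             j += 1
--         line_numbers.append(j)
--         start = idx + 1
-- ===== Notes on version B (the rewrite author's own statement) =====
-- stated objective: alternative
-- what changed: B drops the cumulative line_starts array and bisect binary search; it keeps one forward line pointer with a running boundary that advances monotonically as successive (strictly increasing) match indices are found, an amortized O(N+M) merge instead of O(N + M log N) lookups.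
import Mathlib
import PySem

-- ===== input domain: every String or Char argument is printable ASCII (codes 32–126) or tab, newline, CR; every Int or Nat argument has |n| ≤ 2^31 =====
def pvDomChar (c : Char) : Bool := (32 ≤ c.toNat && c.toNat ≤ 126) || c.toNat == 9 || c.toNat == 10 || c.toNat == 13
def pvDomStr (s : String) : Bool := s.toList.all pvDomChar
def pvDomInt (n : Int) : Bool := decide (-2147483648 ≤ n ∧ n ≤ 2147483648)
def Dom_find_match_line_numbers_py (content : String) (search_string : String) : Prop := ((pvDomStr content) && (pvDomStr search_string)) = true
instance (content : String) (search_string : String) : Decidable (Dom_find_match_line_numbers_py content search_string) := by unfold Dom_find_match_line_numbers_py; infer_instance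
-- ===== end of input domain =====

-- B replaces A's cumulative line_starts array + bisect with one forward line pointer and a running boundary (same return value; neither is claimed faster here).

-- content.splitlines(keepends=True), ported by hand (PySem.Chars.splitlines drops the ends).
-- Exact on the input domain: splits on '\n', '\r' and '\r\n' (the only line breaks among tab/CR/LF/printable ASCII).
-- curRev is the current (unterminated) line, reversed; shared by both ports (both Pythons call the same builtin).
def pvSplitKeep : List Char → List Char → List (List Char)
  | [], curRev => if curRev = [] then [] else [curRev.reverse]
  | '\r' :: '\n' :: rest, curRev => (curRev.reverse ++ ['\r', '\n']) :: pvSplitKeep rest []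
  | '\n' :: rest, curRev => (curRev.reverse ++ ['\n']) :: pvSplitKeep rest []
  | '\r' :: rest, curRev => (curRev.reverse ++ ['\r']) :: pvSplitKeep rest []
  | c :: rest, curRev => pvSplitKeep rest (c :: curRev)

-- shared bound facts for the find-loop termination of both ports
theorem pvFind_bounds (c sub : List Char) (k : Nat)
    (h : PySem.Chars.findFrom c sub (k : Int) ≠ -1) :
    k ≤ c.length ∧ (k : Int) ≤ PySem.Chars.findFrom c sub (k : Int) ∧
      PySem.Chars.findFrom c sub (k : Int) ≤ (c.length : Int) := by
  by_cases hk : k ≤ c.length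
  · have hrw := PySem.Chars.findFrom_natCast c sub k hk
    by_cases hf : PySem.Chars.find (c.drop k) sub = -1
    · rw [hrw, if_pos hf] at h; exact absurd rfl h
    · have h0 : -1 ≤ PySem.Chars.find (c.drop k) sub := PySem.Chars.neg_one_le_find (c.drop k) sub
      have hle := PySem.Chars.find_le_length (c.drop k) sub
      rw [List.length_drop] at hle
      rw [hrw, if_neg hf]
      refine ⟨hk, by omega, ?_⟩
      have : (k : Int) + ((c.length - k : Nat) : Int) = (c.length : Int) := by push_cast; omega
      omega
  · exfalso
    apply h
    simp only [PySem.Chars.findFrom]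
    rw [if_pos (by push_cast; omega)]

-- ===== PORT A =====
-- A's for-loop building line_starts: state (line_starts, char_pos)
def pvStartsAux : List (List Char) → List Int → Int → List Int
  | [], acc, _ => acc
  | l :: rest, acc, pos => pvStartsAux rest (acc ++ [pos]) (pos + l.length)

-- A's `while True` find loop: binary search (bisect_right) per match
def pvLoopA (c sub : List Char) (ls : List Int) (start : Nat) (acc : List Int) : List Int :=
  let idx := PySem.Chars.findFrom c sub (start : Int)
  if h : idx = -1 then acc
  else pvLoopA c sub ls (idx.toNat + 1) (acc ++ [(PySem.List.bisectRight ls idx : Int)])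
termination_by c.length + 1 - start
decreasing_by
  have := pvFind_bounds c sub start h
  omega

def find_match_line_numbers_py (content : String) (search_string : String) : List Int :=
  let lines := pvSplitKeep content.toList []
  if lines = [] then []
  else
    let line_starts := pvStartsAux lines [] 0
    pvLoopA content.toList search_string.toList line_starts 0 []

-- ===== PORT B =====
-- B's inner `while j < len(lines) and boundary <= idx` pointer advance
def pvAdvanceB (lines : List (List Char)) (j : Nat) (boundary : Int) (idx : Int) : Nat × Int :=
  if _h : j < lines.length ∧ boundary ≤ idx then
    pvAdvanceB lines (j + 1) (boundary + (lines[j]!).length) idx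
  else (j, boundary)
termination_by lines.length - j

-- B's `while True` find loop threading the line pointer j and running boundary
def pvLoopB (c sub : List Char) (lines : List (List Char)) (j : Nat) (boundary : Int)
    (start : Nat) (acc : List Int) : List Int :=
  let idx := PySem.Chars.findFrom c sub (start : Int)
  if h : idx = -1 then acc
  else
    let jb := pvAdvanceB lines j boundary idx
    pvLoopB c sub lines jb.1 jb.2 (idx.toNat + 1) (acc ++ [(jb.1 : Int)])
termination_by c.length + 1 - start
decreasing_by
  have := pvFind_bounds c sub start h
  omega

def find_match_line_numbers_py_alt (content : String) (search_string : String) : List Int :=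
  match pvSplitKeep content.toList [] with
  | [] => []
  | l0 :: rest => pvLoopB content.toList search_string.toList (l0 :: rest) 1 (l0.length : Int) 0 []

-- ===== PRECONDITION & SPEC =====
def Spec_find_match_line_numbers_py (content : String) (search_string : String) (out : List Int) : Prop := out = find_match_line_numbers_py_alt content search_string
instance (content : String) (search_string : String) (out : List Int) : Decidable (Spec_find_match_line_numbers_py content search_string out) := by unfold Spec_find_match_line_numbers_py; infer_instance

-- ===== CLAIM (what is proved, stated in full; the proofs are below) =====
def Claim_equal_find_match_line_numbers_py : Prop := ∀ (content : String) (search_string : String), Dom_find_match_line_numbers_py content search_string → Spec_find_match_line_numbers_py content search_string (find_match_line_numbers_py content search_string)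

-- ===== LEMMAS AND PROOFS =====

-- prefix sums of line lengths: pvS lines k = start index of 0-based line k
def pvS : List (List Char) → Nat → Nat
  | _, 0 => 0
  | [], _ + 1 => 0
  | l :: rest, k + 1 => l.length + pvS rest k

-- clean form of A's line_starts
def pvStarts : List (List Char) → Int → List Int
  | [], _ => []
  | l :: rest, pos => pos :: pvStarts rest (pos + l.length)

theorem pvStartsAux_eq (lines : List (List Char)) (acc : List Int) (pos : Int) :
    pvStartsAux lines acc pos = acc ++ pvStarts lines pos := by
  induction lines generalizing acc pos with
  | nil => simp [pvStartsAux, pvStarts]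
  | cons l rest ih => simp [pvStartsAux, pvStarts, ih]

theorem pvS_zero (lines : List (List Char)) : pvS lines 0 = 0 := by cases lines <;> rfl

theorem pvS_succ (lines : List (List Char)) (k : Nat) (hk : k < lines.length) :
    pvS lines (k + 1) = pvS lines k + lines[k].length := by
  induction lines generalizing k with
  | nil => simp at hk
  | cons l rest ih =>
      cases k with
      | zero => simp [pvS, pvS_zero]
      | succ m => simp only [pvS, List.getElem_cons_succ]; rw [ih m (by simpa using hk)]; omega

theorem pvS_step (lines : List (List Char)) (k : Nat) : pvS lines k ≤ pvS lines (k + 1) := by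
  induction lines generalizing k with
  | nil => cases k <;> simp [pvS]
  | cons l rest ih =>
      cases k with
      | zero => simp [pvS, pvS_zero]
      | succ m => simpa [pvS] using ih m

theorem pvS_mono (lines : List (List Char)) {k m : Nat} (h : k ≤ m) :
    pvS lines k ≤ pvS lines m := by
  induction m, h using Nat.le_induction with
  | base => exact Nat.le_refl _
  | succ m hm ih => exact Nat.le_trans ih (pvS_step lines m)

theorem pvStarts_length (lines : List (List Char)) (pos : Int) :
    (pvStarts lines pos).length = lines.length := by
  induction lines generalizing pos with
  | nil => rfl
  | cons l rest ih => simp [pvStarts, ih]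

theorem pvStarts_getElem (lines : List (List Char)) (pos : Int) (k : Nat)
    (hk : k < (pvStarts lines pos).length) :
    (pvStarts lines pos)[k] = pos + (pvS lines k : Int) := by
  induction lines generalizing pos k with
  | nil => simp [pvStarts] at hk
  | cons l rest ih =>
      cases k with
      | zero => simp [pvStarts, pvS_zero]
      | succ m =>
          have hm : m < (pvStarts rest (pos + l.length)).length := by
            simpa [pvStarts] using hk
          have := ih (pos + (l.length : Int)) m hm
          simp only [pvStarts, List.getElem_cons_succ]
          rw [this]
          simp only [pvS]
          push_cast
          ring

theorem pvStarts_pairwise (lines : List (List Char)) (pos : Int) :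
    (pvStarts lines pos).Pairwise (· ≤ ·) := by
  rw [List.pairwise_iff_getElem]
  intro i j hi hj hij
  rw [pvStarts_getElem lines pos i hi, pvStarts_getElem lines pos j hj]
  have := pvS_mono lines (Nat.le_of_lt hij)
  omega

-- characterization of B's pointer advance, started from a true boundary
theorem pvAdvanceB_char (lines : List (List Char)) (idx : Int) (j : Nat)
    (hjn : j ≤ lines.length) :
    (pvAdvanceB lines j (pvS lines j : Int) idx).2 = ((pvS lines (pvAdvanceB lines j (pvS lines j : Int) idx).1 : Nat) : Int) ∧
    j ≤ (pvAdvanceB lines j (pvS lines j : Int) idx).1 ∧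
    (pvAdvanceB lines j (pvS lines j : Int) idx).1 ≤ lines.length ∧
    ((pvAdvanceB lines j (pvS lines j : Int) idx).1 = lines.length ∨ idx < (pvS lines (pvAdvanceB lines j (pvS lines j : Int) idx).1 : Int)) ∧
    (j < (pvAdvanceB lines j (pvS lines j : Int) idx).1 → (pvS lines ((pvAdvanceB lines j (pvS lines j : Int) idx).1 - 1) : Int) ≤ idx) := by
  induction hn : lines.length - j generalizing j with
  | zero =>
      have hj : ¬ (j < lines.length ∧ (pvS lines j : Int) ≤ idx) := by
        rintro ⟨h1, -⟩; omega
      rw [pvAdvanceB, dif_neg hj]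
      refine ⟨rfl, Nat.le_refl _, hjn, ?_, by omega⟩
      left; omega
  | succ n ih =>
      by_cases hc : j < lines.length ∧ (pvS lines j : Int) ≤ idx
      · rw [pvAdvanceB, dif_pos hc]
        have hb : (pvS lines j : Int) + ((lines[j]!).length : Int) = (pvS lines (j + 1) : Int) := by
          rw [getElem!_pos lines j hc.1, pvS_succ lines j hc.1]; push_cast; ring
        rw [hb]
        obtain ⟨i1, i2, i3, i4, i5⟩ := ih (j + 1) hc.1 (by omega)
        refine ⟨i1, by omega, i3, i4, ?_⟩
        intro hlt
        by_cases he : j + 1 < (pvAdvanceB lines (j + 1) (pvS lines (j + 1) : Int) idx).1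
        · exact i5 he
        · have : (pvAdvanceB lines (j + 1) (pvS lines (j + 1) : Int) idx).1 = j + 1 := by omega
          rw [this]
          simpa using hc.2
      · rw [pvAdvanceB, dif_neg hc]
        refine ⟨rfl, Nat.le_refl _, hjn, ?_, by omega⟩
        rcases Nat.lt_or_ge j lines.length with h1 | h1
        · right; push_neg at hc; exact hc h1
        · left; omega

-- B's advance lands exactly on A's bisect_right result
theorem pvAdvanceB_eq_bisect (lines : List (List Char)) (idx : Int) (j : Nat)
    (hj1 : 1 ≤ j) (hjn : j ≤ lines.length)
    (hlow : ((pvS lines (j - 1) : Nat) : Int) ≤ idx) :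
    (pvAdvanceB lines j (pvS lines j : Int) idx).1 = PySem.List.bisectRight (pvStarts lines 0) idx := by
  obtain ⟨-, h2, h3, h4, h5⟩ := pvAdvanceB_char lines idx j hjn
  set r := (pvAdvanceB lines j (pvS lines j : Int) idx).1 with hr
  obtain ⟨b1, b2, b3⟩ := PySem.List.bisectRight_spec (pvStarts lines 0) idx (pvStarts_pairwise lines 0)
  set b := PySem.List.bisectRight (pvStarts lines 0) idx with hbdef
  rw [pvStarts_length] at b1
  have hlen : ∀ k, k < lines.length → k < (pvStarts lines 0).length := by
    intro k hk; rwa [pvStarts_length]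
  have hval : ∀ (k : Nat) (hk : k < (pvStarts lines 0).length), (pvStarts lines 0)[k] = (pvS lines k : Int) := by
    intro k hk; rw [pvStarts_getElem]; omega
  -- pvS (r-1) ≤ idx in all cases
  have hlow' : (pvS lines (r - 1) : Int) ≤ idx := by
    by_cases hjr : j < r
    · exact h5 hjr
    · have : r = j := by omega
      rw [this]; exact hlow
  have hrb : r ≤ b := by
    by_contra hcon
    push_neg at hcon
    have hr1 : r - 1 < lines.length := by omega
    have := b3 (r - 1) (hlen _ hr1) (by omega)
    rw [hval _ (hlen _ hr1)] at this
    omega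
  have hbr : b ≤ r := by
    rcases h4 with h4 | h4
    · omega
    · by_contra hcon
      push_neg at hcon
      have hrlen : r < lines.length := by omega
      have := b2 r (hlen _ hrlen) hcon
      rw [hval _ (hlen _ hrlen)] at this
      omega
  omega

-- the two find loops agree under the pointer invariant
theorem pvLoops_eq (c sub : List Char) (lines : List (List Char)) (start j : Nat)
    (acc : List Int) (hj1 : 1 ≤ j) (hjn : j ≤ lines.length)
    (hlow : ((pvS lines (j - 1) : Nat) : Int) ≤ (start : Int)) :
    pvLoopA c sub (pvStarts lines 0) start acc =
      pvLoopB c sub lines j (pvS lines j : Int) start acc := by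
  induction hn : c.length + 1 - start using Nat.strong_induction_on generalizing start j acc with
  | _ n ih =>
  rw [pvLoopA, pvLoopB]
  by_cases hidx : PySem.Chars.findFrom c sub (start : Int) = -1
  · rw [dif_pos hidx, dif_pos hidx]
  · rw [dif_neg hidx, dif_neg hidx]
    obtain ⟨hk, hks, hkl⟩ := pvFind_bounds c sub start hidx
    set idx := PySem.Chars.findFrom c sub (start : Int) with hidxdef
    have hlow2 : ((pvS lines (j - 1) : Nat) : Int) ≤ idx := le_trans hlow hks
    obtain ⟨a1, a2, a3, -, a5⟩ := pvAdvanceB_char lines idx j hjn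
    show pvLoopA c sub (pvStarts lines 0) (idx.toNat + 1)
          (acc ++ [(PySem.List.bisectRight (pvStarts lines 0) idx : Int)]) =
        pvLoopB c sub lines (pvAdvanceB lines j (pvS lines j : Int) idx).1
          (pvAdvanceB lines j (pvS lines j : Int) idx).2 (idx.toNat + 1)
          (acc ++ [((pvAdvanceB lines j (pvS lines j : Int) idx).1 : Int)])
    rw [a1, pvAdvanceB_eq_bisect lines idx j hj1 hjn hlow2]
    have hlow3 : ((pvS lines ((pvAdvanceB lines j (pvS lines j : Int) idx).1 - 1) : Nat) : Int)
        ≤ ((idx.toNat + 1 : Nat) : Int) := by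
      have : (pvS lines ((pvAdvanceB lines j (pvS lines j : Int) idx).1 - 1) : Int) ≤ idx := by
        by_cases hjr : j < (pvAdvanceB lines j (pvS lines j : Int) idx).1
        · exact a5 hjr
        · have : (pvAdvanceB lines j (pvS lines j : Int) idx).1 = j := by omega
          rw [this]; exact hlow2
      omega
    rw [pvAdvanceB_eq_bisect lines idx j hj1 hjn hlow2] at hlow3 a2 a3
    exact ih (c.length + 1 - (idx.toNat + 1)) (by omega) (idx.toNat + 1)
      (PySem.List.bisectRight (pvStarts lines 0) idx) _ (by omega) a3 hlow3 rfl

-- ===== VERDICT (by name: the statement is the Claim_ definition above) =====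
theorem find_match_line_numbers_py_spec : Claim_equal_find_match_line_numbers_py := by
  intro content search_string _
  unfold Spec_find_match_line_numbers_py find_match_line_numbers_py find_match_line_numbers_py_alt
  cases h : pvSplitKeep content.toList [] with
  | nil => simp
  | cons l0 rest =>
      simp only [if_neg (List.cons_ne_nil l0 rest), pvStartsAux_eq, List.nil_append]
      have hb : ((l0.length : Int)) = ((pvS (l0 :: rest) 1 : Nat) : Int) := by
        simp [pvS, pvS_zero]
      rw [hb]
      exact pvLoops_eq content.toList search_string.toList (l0 :: rest) 0 1 [] (by omega)
        (by simp) (by simp [pvS])
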